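-- pv_equiv track=rewrite | github.com/jakobkhansen/KattisSolutions | pokerhand/pokerhand.py | pokerhand
-- ===== SOURCE A (Python) =====
-- def pokerhand(lines):
--     power = {}
--     for card in lines[0].split():
--         rank = card[0]
--         if rank in power:
--             power[rank] += 1
--         else:
--             power[rank] = 1
--     return power[max(power.keys(), key=power.get)]
-- ===== SOURCE B (Python) =====
-- def pokerhand(lines):
--     ranks = sorted(card[0] for card in lines[0].split())
--     best = 0
--     run = 0
--     prev = None
--     for r in ranks:
--         run = run + 1 if r == prev else 1
--         if run > best:
--             best = run
--         prev = r
--     return best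
-- ===== Notes on version B (the rewrite author's own statement) =====
-- stated objective: alternative
-- what changed: Replaces the hash-table frequency dictionary and max-by-key over its keys with sort-then-scan: sort the ranks and make one pass tracking the current run of equal adjacent ranks and the best run length.
import Mathlib
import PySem

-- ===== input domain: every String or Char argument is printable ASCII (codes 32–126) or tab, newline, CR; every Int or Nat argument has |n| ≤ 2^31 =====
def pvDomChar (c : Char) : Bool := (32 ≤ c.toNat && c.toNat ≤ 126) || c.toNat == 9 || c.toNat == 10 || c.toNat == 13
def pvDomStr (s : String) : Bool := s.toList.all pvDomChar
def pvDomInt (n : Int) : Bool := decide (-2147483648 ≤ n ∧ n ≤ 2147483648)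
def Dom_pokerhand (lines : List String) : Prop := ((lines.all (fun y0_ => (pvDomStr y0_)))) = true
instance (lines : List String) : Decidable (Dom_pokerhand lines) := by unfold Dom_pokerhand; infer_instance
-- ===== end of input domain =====

-- B replaces A's frequency dictionary + max-by-key with sort-then-scan over runs of equal
-- adjacent ranks; objective: alternative (same task, genuinely different algorithm).

-- ===== PORT A =====
def pokerhand (lines : List String) : Int :=
  let power := (PySem.Str.split₀ (PySem.List.pyGetD lines 0 "")).foldl
    (fun d card =>
      -- card[0]; split₀ never yields an empty token, so the default is unreachable
      let rank := (PySem.Str.pyGet? card 0).getD ' '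
      if d.contains rank then d.modify rank 0 (· + 1)
      else d.insert rank 1)
    PySem.Dict.empty
  match PySem.List.max? power.keys (fun k => power.getD k 0) with
  | some k => power.getD k 0
  | none => 0   -- Python: max() of empty keys raises ValueError; excluded by Pre_

-- ===== PORT B =====
-- one step of B's loop body: run update, best update, prev := r
def pvStep (st : Int × Int × Option Char) (r : Char) : Int × Int × Option Char :=
  let run := if some r == st.2.2 then st.2.1 + 1 else 1
  let best := if run > st.1 then run else st.1
  (best, run, some r)

def pokerhand_alt (lines : List String) : Int :=
  let ranks := PySem.List.sorted
    ((PySem.Str.split₀ (PySem.List.pyGetD lines 0 "")).map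
      (fun card => (PySem.Str.pyGet? card 0).getD ' '))
    (fun x => x) false
  (ranks.foldl pvStep (0, 0, none)).1

-- ===== PRECONDITION & SPEC =====
-- Pre_ excludes exactly the inputs where A raises: no line at all (IndexError) or a
-- whitespace-only first line (max of an empty dict: ValueError).
def Pre_pokerhand (lines : List String) : Prop :=
  lines ≠ [] ∧ PySem.Str.split₀ (PySem.List.pyGetD lines 0 "") ≠ []
instance (lines : List String) : Decidable (Pre_pokerhand lines) := by unfold Pre_pokerhand; infer_instance
def pvWitness_pokerhand : List String := ["AS AH 3C"]

def Spec_pokerhand (lines : List String) (out : Int) : Prop := out = pokerhand_alt lines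
instance (lines : List String) (out : Int) : Decidable (Spec_pokerhand lines out) := by unfold Spec_pokerhand; infer_instance

-- ===== CLAIM (what is proved, stated in full; the proofs are below) =====
def Claim_equal_pokerhand : Prop := ∀ (lines : List String), Dom_pokerhand lines → Pre_pokerhand lines → Spec_pokerhand lines (pokerhand lines)

-- ===== LEMMAS AND PROOFS =====

-- A's loop (branching on membership) builds exactly Counter(ranks).
theorem power_eq_counter (toks : List String) (f : String → Char) :
    toks.foldl (fun (d : PySem.Dict Char Int) card =>
        if d.contains (f card) then d.modify (f card) 0 (· + 1)
        else d.insert (f card) 1) PySem.Dict.empty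
      = PySem.Dict.counter (toks.map f) := by
  rw [PySem.Dict.counter_eq_foldl, List.foldl_map]
  congr 1
  funext d card
  split_ifs with h
  · rfl
  · simp [PySem.Dict.modify, PySem.Dict.getD_of_not_contains d 0 (by simpa using h)]

-- B's scan over a sorted list q ++ [a]: the run counter ends at count a, and best is the
-- maximum multiplicity (it dominates every count and is attained).
theorem fold_runs (q : List Char) : ∀ (a : Char), (q ++ [a]).Pairwise (· ≤ ·) →
    ∃ b : Int, (q ++ [a]).foldl pvStep (0, 0, none)
        = (b, ((q ++ [a]).count a : Int), some a)
      ∧ (∀ r ∈ q ++ [a], ((q ++ [a]).count r : Int) ≤ b)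
      ∧ (∃ r ∈ q ++ [a], b = ((q ++ [a]).count r : Int)) := by
  induction q using List.reverseRecOn with
  | nil =>
    intro a _
    refine ⟨1, by simp [pvStep], ?_, ⟨a, by simp⟩⟩
    intro r hr
    simp at hr
    simp [hr]
  | append_singleton q' l ih =>
    intro a hp
    have hp' : (q' ++ [l]).Pairwise (· ≤ ·) :=
      hp.sublist (List.sublist_append_left _ _)
    obtain ⟨b, hfold, hdom, r₀, hr₀, hb⟩ := ih l hp'
    have hle : ∀ x ∈ q' ++ [l], x ≤ a := by
      intro x hx
      exact (List.pairwise_append.1 hp).2.2 x hx a (by simp)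
    have hfold' : (q' ++ [l] ++ [a]).foldl pvStep (0, 0, none)
        = pvStep ((q' ++ [l]).foldl pvStep (0, 0, none)) a := by
      simp [List.foldl_append]
    have hcnt : ∀ r, ((q' ++ [l] ++ [a]).count r : Int)
        = ((q' ++ [l]).count r : Int) + (if a = r then 1 else 0) := by
      intro r
      rw [List.count_append, List.count_singleton']
      push_cast
      split_ifs <;> simp
    by_cases hal : a = l
    · subst hal
      set c : Int := ((q' ++ [a]).count a : Int) with hc
      have hca : ((q' ++ [a] ++ [a]).count a : Int) = c + 1 := by
        rw [hcnt a, if_pos rfl]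
      refine ⟨if c + 1 > b then c + 1 else b, ?_, ?_, ?_⟩
      · rw [hfold', hfold, hca]
        simp [pvStep]
      · intro r hr
        by_cases har : a = r
        · subst har
          rw [hca]
          split_ifs <;> omega
        · have hrq : r ∈ q' ++ [a] := by
            rcases List.mem_append.1 hr with h | h
            · exact h
            · simp at h; exact absurd h.symm har
          rw [hcnt r, if_neg har, add_zero]
          have := hdom r hrq
          split_ifs <;> omega
      · by_cases hgt : c + 1 > b
        · exact ⟨a, by simp, by rw [if_pos hgt, hca]⟩
        · have hra : ¬ a = r₀ := by
            intro h
            subst h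
            rw [← hc] at hb
            omega
          exact ⟨r₀, List.mem_append_left _ hr₀,
            by rw [if_neg hgt, hb, hcnt r₀, if_neg hra, add_zero]⟩
    · have hnotin : a ∉ q' ++ [l] := by
        intro hin
        have h1 : a ≤ l := by
          rcases List.mem_append.1 hin with h | h
          · exact (List.pairwise_append.1 hp').2.2 a h l (by simp)
          · simp at h; exact le_of_eq h
        exact hal (le_antisymm h1 (hle l (by simp)))
      have hcq : (q' ++ [l]).count a = 0 := List.count_eq_zero.2 hnotin
      have hcnta : ((q' ++ [l] ++ [a]).count a : Int) = 1 := by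
        rw [hcnt a, hcq]; simp
      have hb1 : 1 ≤ b := by
        rw [hb]
        have : 0 < (q' ++ [l]).count r₀ := List.count_pos_iff.2 hr₀
        omega
      refine ⟨b, ?_, ?_, ?_⟩
      · rw [hfold', hfold, hcnta]
        have hne : (some a == some l) = false := by simp [hal]
        simp only [pvStep, hne]
        simp
        omega
      · intro r hr
        by_cases har : a = r
        · subst har
          rw [hcnta]; exact hb1
        · have hrq : r ∈ q' ++ [l] := by
            rcases List.mem_append.1 hr with h | h
            · exact h
            · simp at h; exact absurd h.symm har
          rw [hcnt r, if_neg har, add_zero]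
          exact hdom r hrq
      · have hra : ¬ a = r₀ := fun h => hnotin (h ▸ hr₀)
        exact ⟨r₀, List.mem_append_left _ hr₀,
          by rw [hb, hcnt r₀, if_neg hra, add_zero]⟩

-- ===== VERDICT (by name: the statement is the Claim_ definition above) =====
theorem pokerhand_spec : Claim_equal_pokerhand := by
  intro lines _ hpre
  obtain ⟨_, hs⟩ := hpre
  unfold Spec_pokerhand pokerhand pokerhand_alt
  simp only
  rw [power_eq_counter _ (fun card => (PySem.Str.pyGet? card 0).getD ' ')]
  set ranks := (PySem.Str.split₀ (PySem.List.pyGetD lines 0 "")).map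
      (fun card => (PySem.Str.pyGet? card 0).getD ' ') with hranks
  have hrne : ranks ≠ [] := by simpa [hranks] using hs
  -- decompose the sorted list as q ++ [a]
  set srt := PySem.List.sorted ranks (fun x => x) false with hsrt
  have hperm : srt.Perm ranks := PySem.List.sorted_perm ranks _ _
  have hsne : srt ≠ [] := by
    intro h
    rw [h] at hperm
    exact hrne (hperm.symm.eq_nil)
  obtain ⟨q, a, hqa⟩ : ∃ q a, srt = q ++ [a] := by
    rcases List.eq_nil_or_concat srt with h | ⟨q, a, h⟩
    · exact absurd h hsne
    · exact ⟨q, a, by simpa [List.concat_eq_append] using h⟩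
  have hpw : (q ++ [a]).Pairwise (· ≤ ·) := by
    have := PySem.List.sorted_pairwise ranks (fun x => x)
    rw [← hsrt, hqa] at this
    simpa using this
  obtain ⟨b, hfold, hdom, r₀, hr₀, hb⟩ := fold_runs q a hpw
  -- A side: max over the counter's keys
  have hkeys : (PySem.Dict.counter ranks).keys = PySem.Set.ofList ranks :=
    PySem.Dict.keys_counter ranks
  have hkne : (PySem.Dict.counter ranks).keys ≠ [] := by
    rw [hkeys]
    intro h
    obtain ⟨x, hx⟩ := List.exists_mem_of_ne_nil ranks hrne
    have := (PySem.Set.mem_ofList ranks x).2 hx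
    simp [h] at this
  obtain ⟨k, hk⟩ : ∃ k, PySem.List.max? (PySem.Dict.counter ranks).keys
      (fun k => (PySem.Dict.counter ranks).getD k 0) = some k := by
    cases hmk : PySem.List.max? (PySem.Dict.counter ranks).keys
        (fun k => (PySem.Dict.counter ranks).getD k 0) with
    | none => exact absurd ((PySem.List.max?_eq_none_iff _ _).1 hmk) hkne
    | some k => exact ⟨k, rfl⟩
  rw [hk]
  -- B's value
  have hBval : (srt.foldl pvStep (0, 0, none)).1 = b := by
    rw [hqa, hfold]
  rw [hBval]
  -- counts transfer along the permutation
  have hcnt : ∀ r : Char, (q ++ [a]).count r = ranks.count r := by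
    intro r
    rw [← hqa]
    exact hperm.count_eq r
  have hmemiff : ∀ r : Char, r ∈ q ++ [a] ↔ r ∈ ranks := by
    intro r
    rw [← hqa]
    exact hperm.mem_iff
  have hkmem : k ∈ ranks := by
    have := PySem.List.max?_mem hk
    rw [hkeys] at this
    exact (PySem.Set.mem_ofList _ _).1 this
  apply le_antisymm
  · -- A's value = count k ≤ b
    have h1 := hdom k ((hmemiff k).2 hkmem)
    rw [hcnt k] at h1
    simpa [PySem.Dict.getD_counter] using h1
  · -- b = count r₀ ≤ A's value
    have hr₀' : r₀ ∈ (PySem.Dict.counter ranks).keys := by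
      rw [hkeys]
      exact (PySem.Set.mem_ofList _ _).2 ((hmemiff r₀).1 hr₀)
    have h2 := PySem.List.max?_isMax hk _ hr₀'
    rw [hb, hcnt r₀]
    simpa [PySem.Dict.getD_counter] using h2
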